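-- pv_equiv track=rewrite | github.com/Fondamenti18/fondamenti-di-programmazione | students/1795119/homework04/program02.py | posiziona
-- ===== SOURCE A (Python) =====
-- import copy
--
-- def posiziona(griglia, mossa, num):
--     count = 0
--     res = copy.deepcopy(griglia)
--     for i,x in enumerate(griglia):
--         for k,y in enumerate(x):
--             if y == '':
--                 if count == num:
--                     res[i][k] = mossa
--                     return res
--                 count += 1
-- ===== SOURCE B (Python) =====
-- import copy
--
-- def posiziona(griglia, mossa, num):
--     coords = [(i, k)
--               for i, row in enumerate(griglia)
--               for k, y in enumerate(row) if y == '']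
--     if 0 <= num < len(coords):
--         i, k = coords[num]
--         res = copy.deepcopy(griglia)
--         res[i][k] = mossa
--         return res
--     return None
-- ===== Notes on version B (the rewrite author's own statement) =====
-- stated objective: simpler
-- what changed: B replaces A's stateful count-and-early-return nested scan with a comprehension building the list of empty-cell coordinates and a single bounds-checked index lookup.
import Mathlib
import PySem

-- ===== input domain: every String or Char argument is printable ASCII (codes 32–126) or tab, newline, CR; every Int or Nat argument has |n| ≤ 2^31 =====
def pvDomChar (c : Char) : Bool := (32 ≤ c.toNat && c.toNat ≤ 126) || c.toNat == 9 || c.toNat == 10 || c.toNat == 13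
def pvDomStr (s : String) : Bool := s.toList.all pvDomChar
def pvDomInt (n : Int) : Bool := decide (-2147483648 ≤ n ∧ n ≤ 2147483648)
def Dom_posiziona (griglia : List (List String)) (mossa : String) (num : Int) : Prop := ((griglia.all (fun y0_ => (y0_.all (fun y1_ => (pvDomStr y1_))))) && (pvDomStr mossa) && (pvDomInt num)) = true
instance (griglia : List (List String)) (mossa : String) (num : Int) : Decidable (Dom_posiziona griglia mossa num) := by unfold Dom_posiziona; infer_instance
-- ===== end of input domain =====

-- B builds the list of empty-cell coordinates and does one bounds-checked lookup instead of A's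
-- stateful count-and-early-return nested scan (objective: simpler).

-- ===== PORT A =====
-- res[i][k] = mossa  on a list-of-lists grid
def setCellA (res : List (List String)) (i k : Nat) (m : String) : List (List String) :=
  res.set i ((res.getD i []).set k m)

-- inner 'for k,y in enumerate(x)' loop; .inl = early return, .inr = updated count
def innerA (res : List (List String)) (mossa : String) (num : Int) (i : Nat) :
    Nat → List String → Int → (List (List String)) ⊕ Int
  | _, [], count => .inr count
  | k, y :: rest, count =>
    if y = "" then
      if count = num then .inl (setCellA res i k mossa)
      else innerA res mossa num i (k+1) rest (count+1)
    else innerA res mossa num i (k+1) rest count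

-- outer 'for i,x in enumerate(griglia)' loop; falls off the end → Python returns None
def outerA (res : List (List String)) (mossa : String) (num : Int) :
    Nat → List (List String) → Int → Option (List (List String))
  | _, [], _ => none
  | i, x :: rest, count =>
    match innerA res mossa num i 0 x count with
    | .inl g => some g
    | .inr c => outerA res mossa num (i+1) rest c

def posiziona (griglia : List (List String)) (mossa : String) (num : Int) : Option (List (List String)) :=
  -- res = copy.deepcopy(griglia)
  outerA griglia mossa num 0 griglia 0

-- ===== PORT B =====
-- coords = [(i,k) for i,row in enumerate(griglia) for k,y in enumerate(row) if y == '']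
def coordsB (g : List (List String)) : List (Nat × Nat) :=
  g.zipIdx.flatMap (fun p =>
    p.1.zipIdx.filterMap (fun q => if q.1 = "" then some (p.2, q.2) else none))

def posiziona_alt (griglia : List (List String)) (mossa : String) (num : Int) : Option (List (List String)) :=
  let coords := coordsB griglia
  if 0 ≤ num ∧ num < (coords.length : Int) then
    let c := coords.getD num.toNat (0, 0)
    some (setCellA griglia c.1 c.2 mossa)
  else none

-- ===== PRECONDITION & SPEC =====
def Spec_posiziona (griglia : List (List String)) (mossa : String) (num : Int) (out : Option (List (List String))) : Prop := out = posiziona_alt griglia mossa num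
instance (griglia : List (List String)) (mossa : String) (num : Int) (out : Option (List (List String))) : Decidable (Spec_posiziona griglia mossa num out) := by unfold Spec_posiziona; infer_instance

-- ===== CLAIM (what is proved, stated in full; the proofs are below) =====
def Claim_equal_posiziona : Prop := ∀ (griglia : List (List String)) (mossa : String) (num : Int), Dom_posiziona griglia mossa num → Spec_posiziona griglia mossa num (posiziona griglia mossa num)

-- ===== LEMMAS AND PROOFS =====

-- column indices of the empty cells of one row, starting at offset k
def csRowL : List String → Nat → List Nat
  | [], _ => []
  | y :: rest, k => if y = "" then k :: csRowL rest (k+1) else csRowL rest (k+1)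

-- coordinates of all empty cells of the remaining rows, rows numbered from i
def coordsFrom : List (List String) → Nat → List (Nat × Nat)
  | [], _ => []
  | r :: rest, i => (csRowL r 0).map (fun k => (i, k)) ++ coordsFrom rest (i+1)

theorem innerA_spec (res : List (List String)) (m : String) (num : Int) (i : Nat) :
    ∀ (row : List String) (k : Nat) (count : Int),
    innerA res m num i k row count =
      (if 0 ≤ num - count ∧ num - count < ((csRowL row k).length : Int)
       then .inl (setCellA res i ((csRowL row k).getD (num - count).toNat 0) m)
       else .inr (count + (csRowL row k).length)) := by
  intro row
  induction row with
  | nil =>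
    intro k count
    rw [show innerA res m num i k [] count = .inr count from rfl]
    rw [if_neg (by simp only [csRowL, List.length_nil, Nat.cast_zero]; omega)]
    simp [csRowL]
  | cons y rest ih =>
    intro k count
    by_cases hy : y = ""
    · have hcs : csRowL (y :: rest) k = k :: csRowL rest (k+1) := by simp [csRowL, hy]
      have hlen : ((csRowL (y :: rest) k).length : Int) = (csRowL rest (k+1)).length + 1 := by
        rw [hcs]; push_cast [List.length_cons]; ring
      by_cases hc : count = num
      · rw [show innerA res m num i k (y :: rest) count = .inl (setCellA res i k m) by
              simp [innerA, hy, hc]]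
        have hpos : 0 ≤ num - count ∧ num - count < ((csRowL (y :: rest) k).length : Int) := by
          refine ⟨by omega, ?_⟩
          rw [hlen]; omega
        rw [if_pos hpos]
        have h0 : (num - count).toNat = 0 := by omega
        rw [hcs]
        simp [h0]
      · rw [show innerA res m num i k (y :: rest) count
              = innerA res m num i (k+1) rest (count+1) by simp [innerA, hy, hc]]
        rw [ih]
        by_cases h : 0 ≤ num - (count+1) ∧ num - (count+1) < ((csRowL rest (k+1)).length : Int)
        · rw [if_pos h, if_pos (by rw [hlen]; omega)]
          have hnz : (num - count).toNat = (num - (count+1)).toNat + 1 := by omega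
          rw [hcs]
          simp [hnz]
        · rw [if_neg h, if_neg (by rw [hlen]; omega)]
          rw [hcs]
          simp
          ring
    · have hcs : csRowL (y :: rest) k = csRowL rest (k+1) := by simp [csRowL, hy]
      rw [show innerA res m num i k (y :: rest) count
            = innerA res m num i (k+1) rest count by simp [innerA, hy]]
      rw [ih, hcs]

theorem outerA_spec (res : List (List String)) (m : String) (num : Int) :
    ∀ (rows : List (List String)) (i : Nat) (count : Int),
    outerA res m num i rows count =
      (if 0 ≤ num - count ∧ num - count < ((coordsFrom rows i).length : Int)
       then some (setCellA res ((coordsFrom rows i).getD (num - count).toNat (0,0)).1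
                              ((coordsFrom rows i).getD (num - count).toNat (0,0)).2 m)
       else none) := by
  intro rows
  induction rows with
  | nil =>
    intro i count
    rw [show outerA res m num i [] count = none from rfl]
    rw [if_neg (by simp only [coordsFrom, List.length_nil, Nat.cast_zero]; omega)]
  | cons r rest ih =>
    intro i count
    have hcf : coordsFrom (r :: rest) i
        = (csRowL r 0).map (fun k => (i, k)) ++ coordsFrom rest (i+1) := rfl
    have hlen : ((coordsFrom (r :: rest) i).length : Int)
        = (csRowL r 0).length + (coordsFrom rest (i+1)).length := by
      rw [hcf]; push_cast [List.length_append, List.length_map]; ring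
    rw [show outerA res m num i (r :: rest) count
          = (match innerA res m num i 0 r count with
             | .inl g => some g
             | .inr c => outerA res m num (i+1) rest c) from rfl]
    rw [innerA_spec]
    by_cases h : 0 ≤ num - count ∧ num - count < ((csRowL r 0).length : Int)
    · rw [if_pos h]
      have hlt : (num - count).toNat < (csRowL r 0).length := by omega
      have hcoord : (coordsFrom (r :: rest) i).getD (num - count).toNat (0,0)
          = (i, (csRowL r 0).getD (num - count).toNat 0) := by
        rw [hcf]
        simp [List.getD]
        rw [List.getElem?_append_left (by simpa using hlt)]
        simp [List.getElem?_eq_getElem hlt]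
      rw [if_pos (by rw [hlen]; omega)]
      rw [hcoord]
    · rw [if_neg h]
      simp only
      rw [ih]
      by_cases h2 : 0 ≤ num - (count + (csRowL r 0).length) ∧
          num - (count + (csRowL r 0).length) < ((coordsFrom rest (i+1)).length : Int)
      · rw [if_pos h2, if_pos (by rw [hlen]; omega)]
        have hge : (csRowL r 0).length ≤ (num - count).toNat := by omega
        have hcoord : (coordsFrom (r :: rest) i).getD (num - count).toNat (0,0)
            = (coordsFrom rest (i+1)).getD (num - (count + (csRowL r 0).length)).toNat (0,0) := by
          rw [hcf]
          simp only [List.getD]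
          rw [List.getElem?_append_right (by simpa using hge)]
          simp only [List.length_map]
          congr 2
          omega
        rw [hcoord]
      · rw [if_neg h2, if_neg (by rw [hlen]; omega)]

theorem coordsB_eq (g : List (List String)) : coordsB g = coordsFrom g 0 := by
  have main : ∀ (rows : List (List String)) (i : Nat),
      (rows.zipIdx i).flatMap (fun p =>
        p.1.zipIdx.filterMap (fun q => if q.1 = "" then some (p.2, q.2) else none))
      = coordsFrom rows i := by
    intro rows
    induction rows with
    | nil => intro i; simp [coordsFrom]
    | cons r rest ih =>
      intro i
      have row : ∀ (row : List String) (k : Nat),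
          (row.zipIdx k).filterMap (fun q => if q.1 = "" then some (i, q.2) else none)
          = (csRowL row k).map (fun kk => (i, kk)) := by
        intro row
        induction row with
        | nil => intro k; simp [csRowL]
        | cons y ys ihy =>
          intro k
          by_cases hy : y = "" <;> simp [csRowL, hy, ihy]
      simp [coordsFrom, ← ih (i+1), row]
  simpa [coordsB] using main g 0

-- ===== VERDICT (by name: the statement is the Claim_ definition above) =====
theorem posiziona_spec : Claim_equal_posiziona := by
  intro griglia mossa num _
  unfold Spec_posiziona posiziona posiziona_alt
  rw [outerA_spec, coordsB_eq]
  simp only [Int.sub_zero]
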